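-- pv_equiv track=rewrite | github.com/vuanhtuan1012/algorithms | thuat_toan_co_ban/dem/common_character_count.py | count_common_characters
-- ===== SOURCE A (Python) =====
-- from typing import Dict
--
-- def get_frequency(sequence: str) -> Dict[str, int]:
--     """
--     Returns frequency of letters in sequence
--     """
--     sequence = sequence.lower()
--     freq = {}
--     for letter in sequence:
--         freq[letter] = freq.get(letter, 0) + 1
--     return freq
--
-- def count_common_characters(sequence_1: str, sequence_2: str) -> int:
--     """
--     Returns the number of common characters between two given sequences
--     """
--
--     freq_1 = get_frequency(sequence_1)
--     freq_2 = get_frequency(sequence_2)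
--     no_common_chars = 0
--     for code in range(ord("a"), ord("z") + 1):
--         letter = chr(code)
--         no_common_chars += min(freq_1.get(letter, 0), freq_2.get(letter, 0))
--     return no_common_chars
-- ===== SOURCE B (Python) =====
-- def count_common_characters(sequence_1: str, sequence_2: str) -> int:
--     """
--     Returns the number of common characters between two given sequences
--     """
--     remaining = {}
--     for ch in sequence_2.lower():
--         if 'a' <= ch <= 'z':
--             remaining[ch] = remaining.get(ch, 0) + 1
--     total = 0
--     for ch in sequence_1.lower():
--         if 'a' <= ch <= 'z' and remaining.get(ch, 0) > 0:
--             remaining[ch] -= 1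
--             total += 1
--     return total
-- ===== Notes on version B (the rewrite author's own statement) =====
-- stated objective: alternative
-- what changed: Replaces A's two full frequency dicts plus the 26-letter min-combining loop by a greedy one-pass matcher: tally sequence_2's letters once, then scan sequence_1 consuming one remaining occurrence per matching letter; it trades the fixed alphabet loop for per-character bookkeeping of the same linear cost.
import Mathlib
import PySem

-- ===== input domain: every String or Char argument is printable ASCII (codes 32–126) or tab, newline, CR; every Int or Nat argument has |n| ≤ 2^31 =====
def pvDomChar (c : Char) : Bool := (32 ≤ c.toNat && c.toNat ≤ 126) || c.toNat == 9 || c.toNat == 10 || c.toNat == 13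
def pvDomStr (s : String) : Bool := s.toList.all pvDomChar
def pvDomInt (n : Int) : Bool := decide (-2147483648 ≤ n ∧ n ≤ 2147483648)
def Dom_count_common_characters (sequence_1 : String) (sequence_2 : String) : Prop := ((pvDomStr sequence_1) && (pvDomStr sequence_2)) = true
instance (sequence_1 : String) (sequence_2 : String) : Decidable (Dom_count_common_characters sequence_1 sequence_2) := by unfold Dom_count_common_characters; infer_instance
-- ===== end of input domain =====

-- B replaces A's two full frequency dicts plus 26-letter min-loop by a greedy one-pass match
-- (count sequence_2's letters once, then scan sequence_1 consuming remaining occurrences).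

-- ===== PORT A =====
def get_frequency (sequence : String) : PySem.Dict Char Int :=
  (PySem.Str.lower sequence).toList.foldl
    (fun freq letter => freq.insert letter (freq.getD letter 0 + 1)) PySem.Dict.empty

def count_common_characters (sequence_1 : String) (sequence_2 : String) : Int :=
  let freq_1 := get_frequency sequence_1
  let freq_2 := get_frequency sequence_2
  (PySem.List.pyRange 97 123 1).foldl
    (fun no_common_chars code =>
      let letter := Char.ofNat code.toNat
      no_common_chars + min (freq_1.getD letter 0) (freq_2.getD letter 0)) 0

-- ===== PORT B =====
-- the body of B's first loop: `if 'a' <= ch <= 'z': remaining[ch] = remaining.get(ch, 0) + 1`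
def ccc_tally (d : PySem.Dict Char Int) (ch : Char) : PySem.Dict Char Int :=
  if 'a' ≤ ch ∧ ch ≤ 'z' then d.insert ch (d.getD ch 0 + 1) else d

-- the body of B's second loop: `if 'a' <= ch <= 'z' and remaining.get(ch, 0) > 0: remaining[ch] -= 1; total += 1`
def ccc_match (st : PySem.Dict Char Int × Int) (ch : Char) : PySem.Dict Char Int × Int :=
  if ('a' ≤ ch ∧ ch ≤ 'z') ∧ 0 < st.1.getD ch 0 then (st.1.insert ch (st.1.getD ch 0 - 1), st.2 + 1)
  else st

def count_common_characters_alt (sequence_1 : String) (sequence_2 : String) : Int :=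
  let remaining := (PySem.Str.lower sequence_2).toList.foldl ccc_tally PySem.Dict.empty
  ((PySem.Str.lower sequence_1).toList.foldl ccc_match (remaining, 0)).2

-- ===== PRECONDITION & SPEC =====
def Spec_count_common_characters (sequence_1 : String) (sequence_2 : String) (out : Int) : Prop := out = count_common_characters_alt sequence_1 sequence_2
instance (sequence_1 : String) (sequence_2 : String) (out : Int) : Decidable (Spec_count_common_characters sequence_1 sequence_2 out) := by unfold Spec_count_common_characters; infer_instance

-- ===== CLAIM (what is proved, stated in full; the proofs are below) =====
def Claim_equal_count_common_characters : Prop := ∀ (sequence_1 : String) (sequence_2 : String), Dom_count_common_characters sequence_1 sequence_2 → Spec_count_common_characters sequence_1 sequence_2 (count_common_characters sequence_1 sequence_2)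

-- ===== LEMMAS AND PROOFS =====

-- the ASCII-lowercase-letter test of B's guards, as a Bool predicate
def pvLetterP (c : Char) : Bool := decide ('a' ≤ c ∧ c ≤ 'z')

theorem pv_char_le_iff (a c : Char) : (a ≤ c) ↔ (a.toNat ≤ c.toNat) := by
  rw [Char.le_def, UInt32.le_iff_toNat_le]; exact Iff.rfl

theorem pv_letter_bounds {c : Char} (h : 'a' ≤ c ∧ c ≤ 'z') : 97 ≤ c.toNat ∧ c.toNat ≤ 122 := by
  have h1 := (pv_char_le_iff 'a' c).1 h.1
  have h2 := (pv_char_le_iff c 'z').1 h.2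
  exact ⟨h1, h2⟩

theorem pv_range_char {code : Int} (h : code ∈ PySem.List.pyRange 97 123 1) :
    ((Char.ofNat code.toNat).toNat = code.toNat ∧ ((code.toNat : Int) = code)) ∧
      ('a' ≤ Char.ofNat code.toNat ∧ Char.ofNat code.toNat ≤ 'z') := by
  have h' := (PySem.List.mem_pyRange_one).1 h
  have hn : (Char.ofNat code.toNat).toNat = code.toNat := by
    rw [Char.toNat_ofNat, if_pos (Or.inl (by omega))]
  refine ⟨⟨hn, by omega⟩, ?_, ?_⟩
  · rw [pv_char_le_iff]; show 97 ≤ (Char.ofNat code.toNat).toNat; omega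
  · rw [pv_char_le_iff]; show (Char.ofNat code.toNat).toNat ≤ 122; omega

-- sums over a duplicate-free list of two functions that differ at most at one member
theorem pv_sum_map_sub_single {α : Type} [DecidableEq α] :
    ∀ (L : List α), L.Nodup → ∀ {x : α}, x ∈ L →
      ∀ (f f' : α → Int), (∀ y ∈ L, y ≠ x → f y = f' y) →
        (L.map f).sum = (L.map f').sum + (f x - f' x) := by
  intro L
  induction L with
  | nil => intro _ x hx; cases hx
  | cons a L ih =>
    intro hnd x hx f f' hagree
    rcases List.mem_cons.1 hx with rfl | hxL
    · have : ∀ y ∈ L, f y = f' y := by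
        intro y hy
        exact hagree y (List.mem_cons_of_mem _ hy) (fun hyx => ((List.nodup_cons.1 hnd).1 (hyx ▸ hy)))
      simp only [List.map_cons, List.sum_cons, List.map_congr_left this]
      ring
    · have hax : a ≠ x := fun hax => (List.nodup_cons.1 hnd).1 (hax ▸ hxL)
      have := ih (List.nodup_cons.1 hnd).2 hxL f f'
        (fun y hy hyx => hagree y (List.mem_cons_of_mem _ hy) hyx)
      simp only [List.map_cons, List.sum_cons, this,
        hagree a (List.mem_cons_self) hax]
      ring

-- B's first loop only ever inserts letters: it is the plain counting loop over the filtered list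
theorem pv_foldl_tally (L : List Char) (d : PySem.Dict Char Int) :
    L.foldl ccc_tally d = (L.filter pvLetterP).foldl (fun d ch => d.insert ch (d.getD ch 0 + 1)) d := by
  rw [List.foldl_filter]
  congr 1
  funext d' ch
  simp [ccc_tally, pvLetterP]

theorem pv_tally_getD (L : List Char) (c : Char) :
    (L.foldl ccc_tally PySem.Dict.empty).getD c 0 = ((L.filter pvLetterP).count c : Int) := by
  rw [pv_foldl_tally, PySem.Dict.getD_foldl_insert_add_one]
  simp [PySem.Dict.getD_empty]

-- the invariant of B's second loop: the running total plus what can still be matched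
-- equals the 26-letter sum of minima
theorem pv_match_snd :
    ∀ (L : List Char) (d : PySem.Dict Char Int) (t : Int) (g : Char → Nat),
      (∀ c, d.getD c 0 = (g c : Int)) →
      (L.foldl ccc_match (d, t)).2 =
        t + ((PySem.List.pyRange 97 123 1).map
          (fun code => min ((L.count (Char.ofNat code.toNat) : Int)) ((g (Char.ofNat code.toNat) : Int)))).sum := by
  intro L
  induction L with
  | nil =>
    intro d t g _
    rw [List.foldl_nil,
      List.map_congr_left (fun code _ => by
        simp only [List.count_nil, Nat.cast_zero]
        exact min_eq_left (Int.natCast_nonneg _))]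
    simp
  | cons a L ih =>
    intro d t g hd
    rw [List.foldl_cons]
    by_cases hp : 'a' ≤ a ∧ a ≤ 'z'
    · have hab := pv_letter_bounds hp
      have hmem : ((a.toNat : Int)) ∈ PySem.List.pyRange 97 123 1 := by
        rw [PySem.List.mem_pyRange_one]; omega
      have hself : Char.ofNat ((a.toNat : Int)).toNat = a := by
        simp only [Int.toNat_natCast]; exact Char.ofNat_toNat a
      have hagree : ∀ y ∈ PySem.List.pyRange 97 123 1, y ≠ (a.toNat : Int) →
          Char.ofNat y.toNat ≠ a := by
        intro y hy hne heq
        rcases pv_range_char hy with ⟨⟨h1, h2⟩, _⟩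
        apply hne
        have h3 : a.toNat = y.toNat := by rw [← heq, h1]
        omega
      by_cases hz : 0 < g a
      · have hstep : ccc_match (d, t) a = (d.insert a (d.getD a 0 - 1), t + 1) := by
          simp only [ccc_match, hd a]
          rw [if_pos ⟨hp, by exact_mod_cast hz⟩]
        rw [hstep, ih (d.insert a (d.getD a 0 - 1)) (t + 1) (fun c => if c = a then g a - 1 else g c)
          (by
            intro c
            rw [PySem.Dict.getD_insert]
            by_cases hca : c = a
            · subst hca; simp only [ite_true, hd c]; omega
            · simp only [if_neg hca]; exact hd c)]
        rw [pv_sum_map_sub_single _ (PySem.List.nodup_pyRange_one 97 123) hmem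
          (fun code => min (((a :: L).count (Char.ofNat code.toNat) : Int)) ((g (Char.ofNat code.toNat) : Int)))
          (fun code => min ((L.count (Char.ofNat code.toNat) : Int))
            ((if Char.ofNat code.toNat = a then g a - 1 else g (Char.ofNat code.toNat) : Nat) : Int))
          (fun y hy hne => by
            have hya := hagree y hy hne
            simp [Ne.symm hya, hya])]
        simp only [hself, List.count_cons, beq_self_eq_true, if_true]
        have h1 : ((L.count a + 1 : Nat) : Int) = (L.count a : Int) + 1 := by push_cast; ring
        have h2 : ((g a - 1 : Nat) : Int) = (g a : Int) - 1 := by omega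
        rw [h1, h2]
        have h3 : min ((L.count a : Int) + 1) ((g a : Int)) - min ((L.count a : Int)) ((g a : Int) - 1) = 1 := by
          omega
        rw [h3]; ring
      · have hstep : ccc_match (d, t) a = (d, t) := by
          simp only [ccc_match, hd a]
          rw [if_neg (fun hcon => by omega)]
        rw [hstep, ih d t g hd]
        rw [pv_sum_map_sub_single _ (PySem.List.nodup_pyRange_one 97 123) hmem
          (fun code => min (((a :: L).count (Char.ofNat code.toNat) : Int)) ((g (Char.ofNat code.toNat) : Int)))
          (fun code => min ((L.count (Char.ofNat code.toNat) : Int)) ((g (Char.ofNat code.toNat) : Int)))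
          (fun y hy hne => by
            have hya := hagree y hy hne
            simp [Ne.symm hya])]
        simp only [hself, List.count_cons, beq_self_eq_true, if_true]
        have hz0 : g a = 0 := by omega
        have h1 : ((L.count a + 1 : Nat) : Int) = (L.count a : Int) + 1 := by push_cast; ring
        rw [hz0, h1]
        have h4 : min ((L.count a : Int) + 1) ((0 : Nat) : Int) - min ((L.count a : Int)) ((0 : Nat) : Int) = 0 := by
          simp only [Nat.cast_zero]
          omega
        rw [h4]; ring
    · have hstep : ccc_match (d, t) a = (d, t) := by
        simp only [ccc_match]
        rw [if_neg (fun hcon => hp hcon.1)]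
      rw [hstep, ih d t g hd]
      congr 2
      apply List.map_congr_left
      intro code hcode
      rcases pv_range_char hcode with ⟨_, hlet⟩
      have hne : Char.ofNat code.toNat ≠ a := fun h => hp (h ▸ hlet)
      simp [Ne.symm hne]

-- A's frequency dict looks up to the plain count
theorem pv_freq_getD (s : String) (c : Char) :
    (get_frequency s).getD c 0 = (((PySem.Str.lower s).toList.count c : Nat) : Int) := by
  unfold get_frequency
  rw [PySem.Dict.getD_foldl_insert_add_one]
  simp [PySem.Dict.getD_empty]

-- ===== VERDICT (by name: the statement is the Claim_ definition above) =====
set_option maxHeartbeats 1000000 in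
theorem count_common_characters_spec : Claim_equal_count_common_characters := by
  intro s1 s2 _hdom
  unfold Spec_count_common_characters
  show count_common_characters s1 s2 = count_common_characters_alt s1 s2
  have hA : count_common_characters s1 s2 =
      (PySem.List.pyRange 97 123 1).foldl
        (fun no_common_chars code =>
          no_common_chars + min ((get_frequency s1).getD (Char.ofNat code.toNat) 0)
            ((get_frequency s2).getD (Char.ofNat code.toNat) 0)) 0 := rfl
  have hB : count_common_characters_alt s1 s2 =
      ((PySem.Str.lower s1).toList.foldl ccc_match
        ((PySem.Str.lower s2).toList.foldl ccc_tally PySem.Dict.empty, 0)).2 := rfl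
  rw [hA, hB]
  rw [pv_match_snd ((PySem.Str.lower s1).toList)
        ((PySem.Str.lower s2).toList.foldl ccc_tally PySem.Dict.empty) 0
        (fun c => ((PySem.Str.lower s2).toList.filter pvLetterP).count c)
        (fun c => pv_tally_getD _ c)]
  rw [PySem.List.foldl_add]
  congr 1
  refine congrArg List.sum (List.map_congr_left ?_)
  intro code hcode
  rcases pv_range_char hcode with ⟨_, hlet⟩
  rw [pv_freq_getD, pv_freq_getD,
    List.count_filter (by simp only [pvLetterP, decide_eq_true_eq]; exact hlet)]
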